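-- pv_equiv track=rewrite | github.com/Koder9/Data-Format-Encoding-Algorithm-Finder-Analyzer | main.py | check_base
-- ===== SOURCE A (Python) =====
-- def check_base(string):
--     chars = "abcdefghijklmnopqrstuvwxyz0123456789"
--     for x in string:
--         if x in chars:
--             continue
--         else:
--             return False
--     return True
-- ===== SOURCE B (Python) =====
-- def check_base(string):
--     return not string or (string.isalnum() and string == string.lower())
-- ===== Notes on version B (the rewrite author's own statement) =====
-- stated objective: idiomatic
-- what changed: Replaces A's per-character early-exit loop with its 36-char alphabet table by whole-string library predicates: empty, or (string.isalnum() and string equals its own lower()); the alphabet table and the explicit loop disappear.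
import Mathlib
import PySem

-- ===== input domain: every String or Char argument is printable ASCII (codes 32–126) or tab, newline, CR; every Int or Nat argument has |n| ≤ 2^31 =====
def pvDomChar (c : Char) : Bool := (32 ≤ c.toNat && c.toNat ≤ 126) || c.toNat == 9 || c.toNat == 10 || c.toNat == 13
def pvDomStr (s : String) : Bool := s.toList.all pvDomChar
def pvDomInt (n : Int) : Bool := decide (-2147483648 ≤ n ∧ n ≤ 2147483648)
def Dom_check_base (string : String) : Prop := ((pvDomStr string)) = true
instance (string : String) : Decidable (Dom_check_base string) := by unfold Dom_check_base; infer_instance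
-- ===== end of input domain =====

-- B drops A's per-character loop over a 36-char alphabet table and instead combines
-- whole-string library predicates: empty, or (isalnum and equal to its own lower()).

-- ===== PORT A =====
-- 'x in chars' on a single character x and the string chars is character membership.
def checkBaseChars : List Char := "abcdefghijklmnopqrstuvwxyz0123456789".toList

def checkBaseLoop : List Char → Bool
  | [] => true
  | x :: rest => if x ∈ checkBaseChars then checkBaseLoop rest else false

def check_base (string : String) : Bool := checkBaseLoop string.toList

-- ===== PORT B =====
-- 'not string' is the emptiness test; 'string == string.lower()' via PySem.Str.lower.
def check_base_alt (string : String) : Bool :=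
  (string == "") || (PySem.Str.strIsalnum string && string == PySem.Str.lower string)

-- ===== PRECONDITION & SPEC =====
def Spec_check_base (string : String) (out : Bool) : Prop := out = check_base_alt string
instance (string : String) (out : Bool) : Decidable (Spec_check_base string out) := by unfold Spec_check_base; infer_instance

-- ===== CLAIM (what is proved, stated in full; the proofs are below) =====
def Claim_equal_check_base : Prop := ∀ (string : String), Dom_check_base string → Spec_check_base string (check_base string)

-- ===== LEMMAS AND PROOFS =====
theorem checkBaseLoop_iff (l : List Char) :
    checkBaseLoop l = true ↔ ∀ x ∈ l, x ∈ checkBaseChars := by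
  induction l with
  | nil => simp [checkBaseLoop]
  | cons x rest ih =>
    simp only [checkBaseLoop, List.mem_cons]
    by_cases hx : x ∈ checkBaseChars <;> simp [hx, ih]

theorem mem_checkBaseChars_iff (c : Char) :
    c ∈ checkBaseChars ↔ (97 ≤ c.toNat ∧ c.toNat ≤ 122) ∨ (48 ≤ c.toNat ∧ c.toNat ≤ 57) := by
  have hinj : Function.Injective Char.toNat := by
    intro a b h
    rw [← Char.ofNat_toNat a, ← Char.ofNat_toNat b, h]
  rw [← List.mem_map_of_injective hinj]
  have hm : checkBaseChars.map Char.toNat =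
      [97, 98, 99, 100, 101, 102, 103, 104, 105, 106, 107, 108, 109, 110, 111, 112, 113,
       114, 115, 116, 117, 118, 119, 120, 121, 122, 48, 49, 50, 51, 52, 53, 54, 55, 56, 57] := by
    decide
  rw [hm]
  simp only [List.mem_cons, List.not_mem_nil, or_false]
  omega

theorem charLe (a b : Char) : (a ≤ b) ↔ a.toNat ≤ b.toNat := by
  rw [Char.le_def, UInt32.le_iff_toNat_le]
  exact Iff.rfl

theorem charKey (c : Char) :
    (PySem.Chars.isalnum c = true ∧ PySem.Chars.lowerChar c = c) ↔ c ∈ checkBaseChars := by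
  have hupper : PySem.Chars.isupper c = true ↔ (65 ≤ c.toNat ∧ c.toNat ≤ 90) := by
    simp [PySem.Chars.isupper, charLe, show ('A' : Char).toNat = 65 from rfl,
      show ('Z' : Char).toNat = 90 from rfl]
  have hlower : PySem.Chars.islower c = true ↔ (97 ≤ c.toNat ∧ c.toNat ≤ 122) := by
    simp [PySem.Chars.islower, charLe, show ('a' : Char).toNat = 97 from rfl,
      show ('z' : Char).toNat = 122 from rfl]
  have hdigit : PySem.Chars.isdigit c = true ↔ (48 ≤ c.toNat ∧ c.toNat ≤ 57) := by
    simp [PySem.Chars.isdigit, charLe, show ('0' : Char).toNat = 48 from rfl,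
      show ('9' : Char).toNat = 57 from rfl]
  rw [mem_checkBaseChars_iff]
  by_cases h : PySem.Chars.isupper c = true
  · have hn := hupper.mp h
    have heq : PySem.Chars.lowerChar c = Char.ofNat (c.toNat + 32) := by
      simp [PySem.Chars.lowerChar, h]
    have hv : (Char.ofNat (c.toNat + 32)).toNat = c.toNat + 32 := by
      rw [Char.toNat_ofNat, if_pos]
      exact Or.inl (by omega)
    constructor
    · rintro ⟨-, hc⟩
      exfalso
      rw [heq] at hc
      have := congrArg Char.toNat hc
      rw [hv] at this
      omega
    · intro hr
      exfalso
      omega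
  · have h' : PySem.Chars.isupper c = false := by
      cases hb : PySem.Chars.isupper c
      · rfl
      · exact absurd hb h
    have heq : PySem.Chars.lowerChar c = c := by simp [PySem.Chars.lowerChar, h']
    rw [heq]
    simp only [PySem.Chars.isalnum, PySem.Chars.isalpha, Bool.or_eq_true, h',
      Bool.false_or, hlower, hdigit, and_true]

theorem list_eq_map_iff (l : List Char) (f : Char → Char) :
    (l = l.map f) ↔ ∀ x ∈ l, f x = x := by
  induction l with
  | nil => simp
  | cons x rest ih =>
    simp only [List.map_cons, List.cons.injEq, ih, List.mem_cons]
    constructor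
    · rintro ⟨h1, h2⟩ x' hx'
      rcases hx' with rfl | hx'
      · exact h1.symm
      · exact h2 x' hx'
    · intro h
      exact ⟨(h x (Or.inl rfl)).symm, fun x' hx' => h x' (Or.inr hx')⟩

theorem toList_eq_nil (s : String) (h : s.toList = []) : s = "" := by
  have := congrArg String.ofList h
  rw [String.ofList_toList] at this
  simpa using this

theorem beq_ofList (s : String) (l : List Char) :
    (s == String.ofList l) = (s.toList == l) := by
  cases hb : (s.toList == l)
  · rw [beq_eq_false_iff_ne] at hb
    rw [beq_eq_false_iff_ne]
    intro h
    apply hb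
    rw [h]
    simp
  · rw [beq_iff_eq] at hb
    rw [beq_iff_eq]
    have := congrArg String.ofList hb
    rwa [String.ofList_toList] at this

theorem alt_iff (s : String) :
    check_base_alt s = true ↔ ∀ x ∈ s.toList, x ∈ checkBaseChars := by
  unfold check_base_alt
  rw [PySem.Str.lower, beq_ofList s (PySem.Chars.lower s.toList)]
  rcases hs : s.toList with _ | ⟨c, rest⟩
  · simp [toList_eq_nil s hs]
  · have hne : (s == "") = false := by
      rw [beq_eq_false_iff_ne]
      intro h
      rw [h] at hs
      simp at hs
    rw [hne]
    simp only [Bool.false_or, Bool.and_eq_true, beq_iff_eq, PySem.Str.strIsalnum,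
      PySem.Chars.strIsalnum, PySem.Chars.lower, hs, List.isEmpty_cons, Bool.not_false,
      Bool.true_and, List.all_eq_true, list_eq_map_iff]
    constructor
    · rintro ⟨h1, h2⟩ x hx
      exact (charKey x).1 ⟨h1 x hx, h2 x hx⟩
    · intro h
      exact ⟨fun x hx => ((charKey x).2 (h x hx)).1, fun x hx => ((charKey x).2 (h x hx)).2⟩

-- ===== VERDICT (by name: the statement is the Claim_ definition above) =====
theorem check_base_spec : Claim_equal_check_base := by
  intro s _
  unfold Spec_check_base check_base
  rw [Bool.eq_iff_iff, checkBaseLoop_iff, ← alt_iff]
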